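-- pv_equiv track=rewrite | github.com/Checkmarx/chainjacking | chainjacking/chainjacking.py | _parse_go_mod_graph_command_output
-- ===== SOURCE A (Python) =====
-- def _parse_go_mod_graph_command_output(graph_output):
--     lines = graph_output.splitlines()
--     github_usernames = set()
--     go_packages = set()
--     for line in lines:
--         go_package = line.strip().split()[1]
--         go_packages.add(go_package)
--         go_package_parts = go_package.split('/')
--         if go_package_parts[0] == 'github.com':
--             github_usernames.add(go_package_parts[1])
--
--     return go_packages, github_usernames
-- ===== SOURCE B (Python) =====
-- def _parse_go_mod_graph_command_output(graph_output):
--     # Hand-rolled character-level scanner: no splitlines()/split() calls; line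
--     # boundaries, the token list and the slash-separated segments are produced by moving
--     # explicit cursors over the raw string.
--     go_packages = set()
--     github_usernames = set()
--     s = graph_output
--     n = len(s)
--     i = 0
--     while i < n:
--         # find the end of the current line
--         j = i
--         while j < n and s[j] != '\n' and s[j] != '\r':
--             j += 1
--         # tokenize s[i:j] by hand
--         tokens = []
--         k = i
--         while k < j:
--             while k < j and (s[k] == ' ' or s[k] == '\t'):
--                 k += 1
--             t = k
--             while t < j and not (s[t] == ' ' or s[t] == '\t'):
--                 t += 1
--             if t > k:
--                 tokens.append(s[k:t])
--             k = t
--         pkg = tokens[1]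
--         go_packages.add(pkg)
--         # split pkg on '/' by hand
--         parts = []
--         start = 0
--         for e in range(len(pkg)):
--             if pkg[e] == '/':
--                 parts.append(pkg[start:e])
--                 start = e + 1
--         parts.append(pkg[start:])
--         if parts[0] == 'github.com':
--             github_usernames.add(parts[1])
--         # step over the line terminator ('\r\n' counts as one)
--         if j < n and s[j] == '\r' and j + 1 < n and s[j + 1] == '\n':
--             i = j + 2
--         else:
--             i = j + 1
--     return go_packages, github_usernames
-- ===== Notes on version B (the rewrite author's own statement) =====
-- stated objective: alternative
-- what changed: B replaces A's splitlines()/strip()/split() library pipeline with a hand-rolled character-level scanner that moves explicit cursors over the raw string to find line ends, build the token list and cut the slash-separated segments of the package path.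
import Mathlib
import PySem

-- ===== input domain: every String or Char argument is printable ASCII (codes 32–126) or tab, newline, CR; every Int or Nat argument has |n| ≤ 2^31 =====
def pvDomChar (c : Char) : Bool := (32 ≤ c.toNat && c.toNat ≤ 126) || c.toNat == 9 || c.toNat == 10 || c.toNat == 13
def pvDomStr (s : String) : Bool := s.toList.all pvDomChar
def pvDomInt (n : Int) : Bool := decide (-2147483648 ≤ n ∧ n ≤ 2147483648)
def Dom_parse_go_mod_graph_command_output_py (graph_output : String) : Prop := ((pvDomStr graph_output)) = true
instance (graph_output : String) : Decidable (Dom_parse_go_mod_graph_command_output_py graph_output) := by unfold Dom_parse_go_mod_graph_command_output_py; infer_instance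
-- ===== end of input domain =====

-- B replaces A's splitlines()/split() pipeline by a single character-level scan with
-- explicit cursors over the raw string (objective: alternative, same asymptotic cost).

-- ===== PORT A =====
-- p.split('/') (exact: '/' is a nonempty separator, so split? is some)
def pvParts (p : String) : List String := (PySem.Str.split? p "/").getD []

-- one loop iteration of A: take token [1], add it to the package set, and if its first
-- '/'-part is 'github.com' add the second part to the username set (skips where Python raises)
def pvAStep (acc : PySem.Set String × PySem.Set String) (line : String) :
    PySem.Set String × PySem.Set String :=
  match (PySem.Str.split₀ (PySem.Str.strip line))[1]? with
  | none => acc  -- Python: IndexError (excluded by Pre_)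
  | some go_package =>
    let go_packages := PySem.Set.add acc.1 go_package
    if (pvParts go_package).headD "" = "github.com" then
      match (pvParts go_package)[1]? with
      | none => (go_packages, acc.2)  -- Python: IndexError (excluded by Pre_)
      | some u => (go_packages, PySem.Set.add acc.2 u)
    else (go_packages, acc.2)

def parse_go_mod_graph_command_output_py (graph_output : String) : List String × List String :=
  (PySem.Str.splitlines graph_output).foldl pvAStep (PySem.Set.empty, PySem.Set.empty)

-- ===== PORT B =====
-- B's character tests: s[j] != '\n' and s[j] != '\r';  s[k] == ' ' or s[k] == '\t'
def pvIsBreak (c : Char) : Bool := c == '\n' || c == '\r'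
def pvIsBlank (c : Char) : Bool := c == ' ' || c == '\t'

-- Source B's final if/else: step over the line terminator ('\r\n' counts as one)
def pvSkipBreak : List Char → List Char
  | '\r' :: '\n' :: t => t
  | _ :: t => t
  | [] => []

-- Source B's inner tokenizer: the cursor loops k/t cut the blank-separated tokens of the line
-- (the fuel, initially the line length, only makes the recursion structural: each token
-- consumes at least one character, so it never runs out)
def pvTokens : Nat → List Char → List (List Char)
  | 0, _ => []
  | fuel + 1, l =>
    match l.dropWhile pvIsBlank with
    | [] => []
    | c :: t =>
      ((c :: t).takeWhile (fun x => !pvIsBlank x)) ::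
        pvTokens fuel ((c :: t).dropWhile (fun x => !pvIsBlank x))

-- Source B's `for e in range(len(pkg))` loop: cut pkg at every '/' (fuel as above)
def pvSlash : Nat → List Char → List (List Char)
  | 0, cs => [cs]
  | fuel + 1, cs =>
    cs.takeWhile (fun c => !(c == '/')) ::
      (match cs.dropWhile (fun c => !(c == '/')) with
       | [] => []
       | _ :: r => pvSlash fuel r)

-- the body of one outer-loop iteration
def pvBLine (acc : PySem.Set String × PySem.Set String) (line : List Char) :
    PySem.Set String × PySem.Set String :=
  match (pvTokens line.length line)[1]? with
  | none => acc  -- Python: IndexError (excluded by Pre_)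
  | some tok =>
    let gp := PySem.Set.add acc.1 (String.ofList tok)
    let parts := pvSlash (tok.length + 1) tok
    if parts.headD [] = "github.com".toList then
      match parts[1]? with
      | none => (gp, acc.2)  -- Python: IndexError (excluded by Pre_)
      | some u => (gp, PySem.Set.add acc.2 (String.ofList u))
    else (gp, acc.2)

-- Source B's outer `while i < n` loop; the fuel (initially the string length) only makes the
-- recursion structural — it never runs out, since each iteration consumes ≥ 1 character
def pvBLoop : Nat → List Char → PySem.Set String × PySem.Set String →
    PySem.Set String × PySem.Set String
  | 0, _, acc => acc
  | _ + 1, [], acc => acc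
  | fuel + 1, c :: tl, acc =>
    pvBLoop fuel (pvSkipBreak ((c :: tl).dropWhile (fun x => !pvIsBreak x)))
      (pvBLine acc ((c :: tl).takeWhile (fun x => !pvIsBreak x)))

def parse_go_mod_graph_command_output_py_alt (graph_output : String) : List String × List String :=
  pvBLoop graph_output.toList.length graph_output.toList (PySem.Set.empty, PySem.Set.empty)

-- ===== PRECONDITION & SPEC =====
-- Pre_ excludes exactly the inputs where Python A raises IndexError: a line with fewer
-- than two whitespace tokens, or a second token that is the bare github.com host with no
-- slash-segment after it.
def pvPreLine (l : String) : Prop :=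
  2 ≤ (PySem.Str.split₀ (PySem.Str.strip l)).length ∧
  ∀ p ∈ (PySem.Str.split₀ (PySem.Str.strip l))[1]?,
    (pvParts p).headD "" = "github.com" → 2 ≤ (pvParts p).length
def Pre_parse_go_mod_graph_command_output_py (graph_output : String) : Prop :=
  ∀ l ∈ PySem.Str.splitlines graph_output, pvPreLine l
instance (graph_output : String) : Decidable (Pre_parse_go_mod_graph_command_output_py graph_output) := by
  unfold Pre_parse_go_mod_graph_command_output_py pvPreLine; infer_instance

def pvWitness_parse_go_mod_graph_command_output_py : String :=
  "m github.com/foo/bar\nm gopkg.in/yaml.v2\nm github.com/foo/bar"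

def Spec_parse_go_mod_graph_command_output_py (graph_output : String) (out : List String × List String) : Prop := out = parse_go_mod_graph_command_output_py_alt graph_output
instance (graph_output : String) (out : List String × List String) : Decidable (Spec_parse_go_mod_graph_command_output_py graph_output out) := by unfold Spec_parse_go_mod_graph_command_output_py; infer_instance

-- ===== CLAIM (what is proved, stated in full; the proofs are below) =====
def Claim_equal_parse_go_mod_graph_command_output_py : Prop := ∀ (graph_output : String), Dom_parse_go_mod_graph_command_output_py graph_output → Pre_parse_go_mod_graph_command_output_py graph_output → Spec_parse_go_mod_graph_command_output_py graph_output (parse_go_mod_graph_command_output_py graph_output)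


-- ===== LEMMAS AND PROOFS =====

-- ---- generic Char / List facts ----
theorem pvCharInj (c d : Char) (h : c.toNat = d.toNat) : c = d := by
  apply Char.ext; exact UInt32.toNat_inj.mp h

theorem pvBeq (c d : Char) : (c == d) = decide (c.toNat = d.toNat) := by
  by_cases h : c = d
  · subst h; simp
  · have h2 : ¬ c.toNat = d.toNat := fun hn => h (pvCharInj _ _ hn)
    simp [h, h2]

theorem pvTWcongr {α : Type} (p q : α → Bool) : ∀ (l : List α), (∀ a ∈ l, p a = q a) →
    l.takeWhile p = l.takeWhile q
  | [], _ => rfl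
  | a :: l, h => by
    have ha := h a (List.mem_cons_self ..)
    simp only [List.takeWhile_cons, ha]
    split
    · rw [pvTWcongr p q l (fun x hx => h x (List.mem_cons_of_mem _ hx))]
    · rfl

theorem pvDWcongr {α : Type} (p q : α → Bool) : ∀ (l : List α), (∀ a ∈ l, p a = q a) →
    l.dropWhile p = l.dropWhile q
  | [], _ => rfl
  | a :: l, h => by
    have ha := h a (List.mem_cons_self ..)
    simp only [List.dropWhile_cons, ha]
    split
    · exact pvDWcongr p q l (fun x hx => h x (List.mem_cons_of_mem _ hx))
    · rfl

theorem pvDWhead {α : Type} (p : α → Bool) : ∀ (l : List α) (c : α) (t : List α),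
    l.dropWhile p = c :: t → p c = false
  | [], c, t, h => by simp at h
  | a :: l, c, t, h => by
    by_cases ha : p a
    · rw [List.dropWhile_cons_of_pos ha] at h; exact pvDWhead p l c t h
    · rw [List.dropWhile_cons_of_neg ha] at h
      cases h; simpa using ha

theorem pvDWappend {α : Type} (p : α → Bool) : ∀ (l₁ l₂ : List α), l₁.dropWhile p ≠ [] →
    (l₁ ++ l₂).dropWhile p = l₁.dropWhile p ++ l₂
  | [], l₂, h => absurd rfl h
  | a :: l₁, l₂, h => by
    by_cases ha : p a
    · rw [List.dropWhile_cons_of_pos ha] at h ⊢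
      rw [List.cons_append, List.dropWhile_cons_of_pos ha]
      exact pvDWappend p l₁ l₂ h
    · rw [List.dropWhile_cons_of_neg ha] at h ⊢
      rw [List.cons_append, List.dropWhile_cons_of_neg ha]

theorem pvTWappend {α : Type} (p : α → Bool) : ∀ (l₁ l₂ : List α), l₁.dropWhile p ≠ [] →
    (l₁ ++ l₂).takeWhile p = l₁.takeWhile p
  | [], l₂, h => absurd rfl h
  | a :: l₁, l₂, h => by
    by_cases ha : p a
    · rw [List.dropWhile_cons_of_pos ha] at h
      rw [List.cons_append, List.takeWhile_cons_of_pos ha, List.takeWhile_cons_of_pos ha]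
      rw [pvTWappend p l₁ l₂ h]
    · rw [List.cons_append, List.takeWhile_cons_of_neg ha, List.takeWhile_cons_of_neg ha]

theorem pvTWappendAll {α : Type} (p : α → Bool) : ∀ (l₁ l₂ : List α), (∀ a ∈ l₁, p a = true) →
    (l₁ ++ l₂).takeWhile p = l₁ ++ l₂.takeWhile p
  | [], l₂, _ => rfl
  | a :: l₁, l₂, h => by
    rw [List.cons_append, List.takeWhile_cons_of_pos (h a (List.mem_cons_self ..)), List.cons_append,
      pvTWappendAll p l₁ l₂ (fun x hx => h x (List.mem_cons_of_mem _ hx))]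

theorem pvDWappendAll {α : Type} (p : α → Bool) : ∀ (l₁ l₂ : List α), (∀ a ∈ l₁, p a = true) →
    (l₁ ++ l₂).dropWhile p = l₂.dropWhile p
  | [], l₂, _ => rfl
  | a :: l₁, l₂, h => by
    rw [List.cons_append, List.dropWhile_cons_of_pos (h a (List.mem_cons_self ..)),
      pvDWappendAll p l₁ l₂ (fun x hx => h x (List.mem_cons_of_mem _ hx))]

theorem pvDWallNil {α : Type} (p : α → Bool) : ∀ (l : List α), (∀ a ∈ l, p a = true) →
    l.dropWhile p = []
  | [], _ => rfl
  | a :: l, h => by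
    rw [List.dropWhile_cons_of_pos (h a (List.mem_cons_self ..))]
    exact pvDWallNil p l (fun x hx => h x (List.mem_cons_of_mem _ hx))

theorem pvAllOfDWnil {α : Type} (p : α → Bool) (l : List α) (h : l.dropWhile p = []) :
    ∀ a ∈ l, p a = true := by
  intro a ha
  have hl : l = l.takeWhile p := by
    conv_lhs => rw [← List.takeWhile_append_dropWhile (p := p) (l := l)]
    rw [h, List.append_nil]
  rw [hl] at ha
  exact List.mem_takeWhile_imp ha

-- ---- Dom-restricted character classifications ----
-- the break predicate used by PySem.Chars.splitlines
def pvIsBLam : Char → Bool := fun c =>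
  decide (c.toNat = 10) || decide (c.toNat = 13) || decide (c.toNat = 11) || decide (c.toNat = 12) ||
    decide (c.toNat = 28) || decide (c.toNat = 29) || decide (c.toNat = 30) || decide (c.toNat = 133) ||
    decide (c.toNat = 8232) || decide (c.toNat = 8233)

theorem pvSplitlinesDef (cs : List Char) :
    PySem.Chars.splitlines cs = PySem.Chars.splitlines.go pvIsBLam cs [] [] := rfl

theorem pvIsBLam_false (c : Char) (hd : pvDomChar c = true) (hb : pvIsBreak c = false) :
    pvIsBLam c = false := by
  simp only [pvIsBreak, pvBeq, Bool.or_eq_false_iff, decide_eq_false_iff_not] at hb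
  simp only [pvDomChar, Bool.or_eq_true, Bool.and_eq_true, decide_eq_true_eq, beq_iff_eq] at hd
  simp only [pvIsBLam, Bool.or_eq_false_iff, decide_eq_false_iff_not]
  have h10 : c.toNat ≠ 10 := by have e : ('\n').toNat = 10 := by decide
                                rw [e] at hb; exact hb.1
  have h13 : c.toNat ≠ 13 := by have e : ('\r').toNat = 13 := by decide
                                rw [e] at hb; exact hb.2
  omega

theorem pvIsBLam_true (c : Char) (hb : pvIsBreak c = true) : pvIsBLam c = true := by
  simp only [pvIsBreak, pvBeq, Bool.or_eq_true, decide_eq_true_eq] at hb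
  simp only [pvIsBLam, Bool.or_eq_true, decide_eq_true_eq]
  rcases hb with h | h
  · exact Or.inl (Or.inl (Or.inl (Or.inl (Or.inl (Or.inl (Or.inl (Or.inl (Or.inl h))))))))
  · exact Or.inl (Or.inl (Or.inl (Or.inl (Or.inl (Or.inl (Or.inl (Or.inl (Or.inr h))))))))

theorem pvNotCR (c : Char) (hb : pvIsBreak c = false) : c ≠ '\r' := by
  intro h; subst h; simp [pvIsBreak] at hb

theorem pvBlankEq (c : Char) (hd : pvDomChar c = true) (hb : pvIsBreak c = false) :
    PySem.Chars.isspace c = pvIsBlank c := by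
  simp only [pvIsBreak, pvBeq, Bool.or_eq_false_iff, decide_eq_false_iff_not] at hb
  simp only [pvDomChar, Bool.or_eq_true, Bool.and_eq_true, decide_eq_true_eq, beq_iff_eq] at hd
  simp only [PySem.Chars.isspace, pvIsBlank, pvBeq]
  have h10 : c.toNat ≠ 10 := by have e : ('\n').toNat = 10 := by decide
                                rw [e] at hb; exact hb.1
  have h13 : c.toNat ≠ 13 := by have e : ('\r').toNat = 13 := by decide
                                rw [e] at hb; exact hb.2
  have e32 : (' ').toNat = 32 := by decide
  have e9 : ('\t').toNat = 9 := by decide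
  rw [e32, e9]
  apply Bool.eq_iff_iff.mpr
  simp only [Bool.or_eq_true, Bool.and_eq_true, decide_eq_true_eq]
  omega

-- ---- pvSkipBreak facts ----
theorem pvSkipBreak_nil : pvSkipBreak [] = [] := rfl

theorem pvSkipBreak_crlf (t : List Char) : pvSkipBreak ('\r' :: '\n' :: t) = t := rfl

theorem pvSkipBreak_cons (c : Char) (t : List Char)
    (h : ¬(c = '\r' ∧ ∃ r, t = '\n' :: r)) : pvSkipBreak (c :: t) = t := by
  rw [pvSkipBreak.eq_def]
  split
  · rename_i heq; rw [List.cons.injEq] at heq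
    exact absurd ⟨heq.1, _, heq.2⟩ h
  · rename_i heq; rw [List.cons.injEq] at heq; exact heq.2.symm
  · rename_i heq; simp at heq

theorem pvSkipBreak_subset : ∀ (l : List Char) (x : Char), x ∈ pvSkipBreak l → x ∈ l := by
  intro l x h
  by_cases hc : ∃ t, l = '\r' :: '\n' :: t
  · obtain ⟨t, rfl⟩ := hc
    rw [pvSkipBreak_crlf] at h
    exact List.mem_cons_of_mem _ (List.mem_cons_of_mem _ h)
  · cases l with
    | nil => simp [pvSkipBreak_nil] at h
    | cons c t =>
      rw [pvSkipBreak_cons c t (fun ⟨h1, r, h2⟩ => hc ⟨r, by rw [h1, h2]⟩)] at h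
      exact List.mem_cons_of_mem _ h

theorem pvSkipBreak_len : ∀ (c : Char) (t : List Char), (pvSkipBreak (c :: t)).length ≤ t.length := by
  intro c t
  by_cases hc : c = '\r' ∧ ∃ r, t = '\n' :: r
  · obtain ⟨rfl, r, rfl⟩ := hc
    rw [pvSkipBreak_crlf]; simp
  · rw [pvSkipBreak_cons c t hc]

-- ---- PySem.Chars.splitlines.go reduction and run lemmas ----
theorem pvSLnil (isB : Char → Bool) (cur : List Char) (acc : List (List Char)) :
    PySem.Chars.splitlines.go isB [] cur acc =
      (if cur.isEmpty then acc.reverse else (cur.reverse :: acc).reverse) := by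
  rw [PySem.Chars.splitlines.go]

theorem pvSLcons (isB : Char → Bool) (c : Char) (rest cur : List Char) (acc : List (List Char))
    (h1 : isB c = false) (h2 : ¬ (c = '\r' ∧ ∃ r, rest = '\n' :: r)) :
    PySem.Chars.splitlines.go isB (c :: rest) cur acc =
      PySem.Chars.splitlines.go isB rest (c :: cur) acc := by
  rw [PySem.Chars.splitlines.go]
  · simp [h1]
  · intro r hc hr; exact h2 ⟨hc, r, hr⟩

theorem pvSLcrlf (isB : Char → Bool) (rest cur : List Char) (acc : List (List Char)) :
    PySem.Chars.splitlines.go isB ('\r' :: '\n' :: rest) cur acc =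
      PySem.Chars.splitlines.go isB rest [] (cur.reverse :: acc) := by
  rw [PySem.Chars.splitlines.go]

theorem pvSLbr (isB : Char → Bool) (c : Char) (rest cur : List Char) (acc : List (List Char))
    (h1 : isB c = true) (h2 : ¬ (c = '\r' ∧ ∃ r, rest = '\n' :: r)) :
    PySem.Chars.splitlines.go isB (c :: rest) cur acc =
      PySem.Chars.splitlines.go isB rest [] (cur.reverse :: acc) := by
  rw [PySem.Chars.splitlines.go]
  · simp [h1]
  · intro r hc hr; exact h2 ⟨hc, r, hr⟩

theorem pvSLacc (isB : Char → Bool) : ∀ (n : Nat) (cs : List Char), cs.length ≤ n →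
    ∀ (cur : List Char) (acc : List (List Char)),
    PySem.Chars.splitlines.go isB cs cur acc =
      acc.reverse ++ PySem.Chars.splitlines.go isB cs cur [] := by
  intro n
  induction n with
  | zero =>
    intro cs hlen cur acc
    have : cs = [] := List.length_eq_zero_iff.mp (Nat.le_zero.mp hlen)
    subst this
    rw [pvSLnil, pvSLnil]
    split <;> simp
  | succ n ih =>
    intro cs hlen cur acc
    cases cs with
    | nil =>
      rw [pvSLnil, pvSLnil]; split <;> simp
    | cons c rest =>
      by_cases hc : c = '\r' ∧ ∃ r, rest = '\n' :: r
      · obtain ⟨rfl, r, rfl⟩ := hc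
        rw [pvSLcrlf, pvSLcrlf]
        rw [ih r (by simp at hlen; omega) [] (cur.reverse :: acc),
          ih r (by simp at hlen; omega) [] [cur.reverse]]
        simp
      · by_cases hb : isB c
        · rw [pvSLbr isB c rest cur acc hb hc, pvSLbr isB c rest cur [] hb hc]
          rw [ih rest (by simp at hlen; omega) [] (cur.reverse :: acc),
            ih rest (by simp at hlen; omega) [] [cur.reverse]]
          simp
        · rw [pvSLcons isB c rest cur acc (Bool.not_eq_true _ ▸ hb) hc,
            pvSLcons isB c rest cur [] (Bool.not_eq_true _ ▸ hb) hc]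
          exact ih rest (by simp at hlen; omega) (c :: cur) acc

theorem pvSLrun (isB : Char → Bool) : ∀ (L R cur : List Char) (acc : List (List Char)),
    (∀ c ∈ L, isB c = false ∧ c ≠ '\r') →
    PySem.Chars.splitlines.go isB (L ++ R) cur acc =
      PySem.Chars.splitlines.go isB R (L.reverse ++ cur) acc
  | [], R, cur, acc, _ => rfl
  | c :: L, R, cur, acc, h => by
    have hc := h c (List.mem_cons_self ..)
    rw [List.cons_append, pvSLcons isB c (L ++ R) cur acc hc.1 (fun hx => hc.2 hx.1)]
    rw [pvSLrun isB L R (c :: cur) acc (fun x hx => h x (List.mem_cons_of_mem _ hx))]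
    simp

-- splitlines under Dom: peel off one line
theorem pvSplitlinesCons (cs : List Char) (hne : cs ≠ [])
    (hdom : ∀ c ∈ cs, pvDomChar c = true) :
    PySem.Chars.splitlines cs =
      cs.takeWhile (fun c => !pvIsBreak c) ::
        PySem.Chars.splitlines (pvSkipBreak (cs.dropWhile (fun c => !pvIsBreak c))) := by
  set L := cs.takeWhile (fun c => !pvIsBreak c) with hL
  set R := cs.dropWhile (fun c => !pvIsBreak c) with hR
  have hLprop : ∀ c ∈ L, pvIsBLam c = false ∧ c ≠ '\r' := by
    intro c hc
    have hb : pvIsBreak c = false := by simpa using List.mem_takeWhile_imp hc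
    have hdc : pvDomChar c = true := hdom c ((List.takeWhile_sublist _).mem hc)
    exact ⟨pvIsBLam_false c hdc hb, pvNotCR c hb⟩
  rw [pvSplitlinesDef cs, pvSplitlinesDef]
  conv_lhs => rw [show cs = L ++ R from (List.takeWhile_append_dropWhile ..).symm]
  rw [pvSLrun pvIsBLam L R [] [] hLprop]
  cases hr : R with
  | nil =>
    have hLcs : L = cs := by
      have := List.takeWhile_append_dropWhile (p := fun c => !pvIsBreak c) (l := cs)
      rw [← hL, ← hR, hr, List.append_nil] at this
      exact this
    rw [pvSLnil, if_neg (by simp [hLcs, hne]), pvSkipBreak_nil, pvSLnil]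
    simp
  | cons c t =>
    have hcbr : pvIsBreak c = true := by
      have := pvDWhead _ cs c t (hR ▸ hr)
      simpa using this
    have hcB : pvIsBLam c = true := pvIsBLam_true c hcbr
    by_cases hcr : c = '\r' ∧ ∃ r, t = '\n' :: r
    · obtain ⟨rfl, r, rfl⟩ := hcr
      rw [pvSLcrlf]
      rw [pvSLacc pvIsBLam r.length r le_rfl]
      rw [pvSkipBreak_crlf]
      simp
    · rw [pvSLbr pvIsBLam c t (L.reverse ++ []) [] hcB hcr]
      rw [pvSLacc pvIsBLam t.length t le_rfl]
      rw [pvSkipBreak_cons c t hcr]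
      simp

theorem pvSplitlinesNil : PySem.Chars.splitlines ([] : List Char) = [] := by
  rw [pvSplitlinesDef, pvSLnil]; rfl

-- ---- PySem.Chars.split₀.go reduction and run lemmas ----
theorem pvSPnil (cur : List Char) (acc : List (List Char)) :
    PySem.Chars.split₀.go [] cur acc =
      (if cur.isEmpty then acc.reverse else (cur.reverse :: acc).reverse) := by
  rw [PySem.Chars.split₀.go]

theorem pvSPsp (c : Char) (rest cur : List Char) (acc : List (List Char))
    (h : PySem.Chars.isspace c = true) :
    PySem.Chars.split₀.go (c :: rest) cur acc =
      (if cur.isEmpty then PySem.Chars.split₀.go rest [] acc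
       else PySem.Chars.split₀.go rest [] (cur.reverse :: acc)) := by
  rw [PySem.Chars.split₀.go]; simp [h]

theorem pvSPch (c : Char) (rest cur : List Char) (acc : List (List Char))
    (h : PySem.Chars.isspace c = false) :
    PySem.Chars.split₀.go (c :: rest) cur acc = PySem.Chars.split₀.go rest (c :: cur) acc := by
  rw [PySem.Chars.split₀.go]; simp [h]

theorem pvSPacc : ∀ (n : Nat) (cs : List Char), cs.length ≤ n →
    ∀ (cur : List Char) (acc : List (List Char)),
    PySem.Chars.split₀.go cs cur acc = acc.reverse ++ PySem.Chars.split₀.go cs cur [] := by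
  intro n
  induction n with
  | zero =>
    intro cs hlen cur acc
    have : cs = [] := List.length_eq_zero_iff.mp (Nat.le_zero.mp hlen)
    subst this
    rw [pvSPnil, pvSPnil]; split <;> simp
  | succ n ih =>
    intro cs hlen cur acc
    cases cs with
    | nil => rw [pvSPnil, pvSPnil]; split <;> simp
    | cons c rest =>
      have hlen' : rest.length ≤ n := by simp at hlen; omega
      by_cases hs : PySem.Chars.isspace c
      · rw [pvSPsp c rest cur acc hs, pvSPsp c rest cur [] hs]
        cases cur with
        | nil => simp [ih rest hlen' [] acc]
        | cons x xs =>
          rw [if_neg (by simp : ¬((x :: xs).isEmpty = true)),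
            if_neg (by simp : ¬((x :: xs).isEmpty = true))]
          rw [ih rest hlen' [] ((x :: xs).reverse :: acc), ih rest hlen' [] [(x :: xs).reverse]]
          simp
      · rw [pvSPch c rest cur acc (Bool.not_eq_true _ ▸ hs),
          pvSPch c rest cur [] (Bool.not_eq_true _ ▸ hs)]
        exact ih rest hlen' (c :: cur) acc

theorem pvSPrunSp : ∀ (ws rest : List Char) (acc : List (List Char)),
    (∀ c ∈ ws, PySem.Chars.isspace c = true) →
    PySem.Chars.split₀.go (ws ++ rest) [] acc = PySem.Chars.split₀.go rest [] acc
  | [], rest, acc, _ => rfl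
  | c :: ws, rest, acc, h => by
    rw [List.cons_append, pvSPsp c (ws ++ rest) [] acc (h c (List.mem_cons_self ..))]
    simp only [List.isEmpty_nil]
    exact pvSPrunSp ws rest acc (fun x hx => h x (List.mem_cons_of_mem _ hx))

theorem pvSPrunWord : ∀ (w rest cur : List Char) (acc : List (List Char)),
    (∀ c ∈ w, PySem.Chars.isspace c = false) →
    PySem.Chars.split₀.go (w ++ rest) cur acc = PySem.Chars.split₀.go rest (w.reverse ++ cur) acc
  | [], rest, cur, acc, _ => by simp
  | c :: w, rest, cur, acc, h => by
    rw [List.cons_append, pvSPch c (w ++ rest) cur acc (h c (List.mem_cons_self ..))]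
    rw [pvSPrunWord w rest (c :: cur) acc (fun x hx => h x (List.mem_cons_of_mem _ hx))]
    simp

-- split₀: all-space input gives []
theorem pvSplitNil (cs : List Char) (h : cs.dropWhile PySem.Chars.isspace = []) :
    PySem.Chars.split₀ cs = [] := by
  have hcs : cs = cs.takeWhile PySem.Chars.isspace := by
    conv_lhs => rw [← List.takeWhile_append_dropWhile (p := PySem.Chars.isspace) (l := cs)]
    rw [h, List.append_nil]
  show PySem.Chars.split₀.go cs [] [] = []
  rw [hcs, ← List.append_nil (cs.takeWhile PySem.Chars.isspace),
    pvSPrunSp _ [] [] (fun c hc => List.mem_takeWhile_imp hc)]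
  rw [pvSPnil]; rfl

-- split₀: peel off one word
theorem pvSplitCons (cs : List Char) (h : cs.dropWhile PySem.Chars.isspace ≠ []) :
    PySem.Chars.split₀ cs =
      (cs.dropWhile PySem.Chars.isspace).takeWhile (fun c => !PySem.Chars.isspace c) ::
        PySem.Chars.split₀
          ((cs.dropWhile PySem.Chars.isspace).dropWhile (fun c => !PySem.Chars.isspace c)) := by
  set d := cs.dropWhile PySem.Chars.isspace with hd
  set w := d.takeWhile (fun c => !PySem.Chars.isspace c) with hw
  set r2 := d.dropWhile (fun c => !PySem.Chars.isspace c) with hr2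
  have hwns : ∀ c ∈ w, PySem.Chars.isspace c = false := by
    intro c hc
    simpa using List.mem_takeWhile_imp hc
  have hwne : w ≠ [] := by
    cases hdc : d with
    | nil => exact absurd hdc h
    | cons a t =>
      have ha : PySem.Chars.isspace a = false := pvDWhead _ cs a t (hd ▸ hdc)
      rw [hw, hdc, List.takeWhile_cons_of_pos (by simp [ha])]
      simp
  have step1 : PySem.Chars.split₀ cs = PySem.Chars.split₀.go d [] [] := by
    show PySem.Chars.split₀.go cs [] [] = _
    conv_lhs => rw [← List.takeWhile_append_dropWhile (p := PySem.Chars.isspace) (l := cs)]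
    exact pvSPrunSp _ _ [] (fun c hc => List.mem_takeWhile_imp hc)
  have step2 : PySem.Chars.split₀.go d [] [] = PySem.Chars.split₀.go r2 w.reverse [] := by
    conv_lhs => rw [show d = w ++ r2 from (List.takeWhile_append_dropWhile ..).symm]
    rw [pvSPrunWord w r2 [] [] hwns]
    simp
  rw [step1, step2]
  cases hr : r2 with
  | nil =>
    rw [pvSPnil]
    rw [if_neg (by simpa using hwne)]
    simp only [List.reverse_reverse, List.reverse_cons, List.reverse_nil, List.nil_append]
    rw [pvSplitNil [] rfl]
  | cons c2 t2 =>
    have hc2 : PySem.Chars.isspace c2 = true := by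
      have := pvDWhead _ d c2 t2 (hr2 ▸ hr)
      simpa using this
    rw [pvSPsp c2 t2 w.reverse [] hc2, if_neg (by simpa using hwne)]
    rw [pvSPacc t2.length t2 le_rfl [] [w.reverse.reverse]]
    simp only [List.reverse_reverse, List.reverse_cons, List.reverse_nil, List.nil_append]
    show _ = w :: PySem.Chars.split₀.go (c2 :: t2) [] []
    rw [pvSPsp c2 t2 [] [] hc2, if_pos (by simp)]
    simp

-- appending trailing whitespace does not change split₀
theorem pvSplitAppendSpace : ∀ (n : Nat) (cs : List Char), cs.length ≤ n →
    ∀ (ws : List Char), (∀ c ∈ ws, PySem.Chars.isspace c = true) →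
    PySem.Chars.split₀ (cs ++ ws) = PySem.Chars.split₀ cs := by
  intro n
  induction n using Nat.strong_induction_on with
  | _ n ih =>
    intro cs hlen ws hws
    by_cases hd : cs.dropWhile PySem.Chars.isspace = []
    · rw [pvSplitNil cs hd, pvSplitNil (cs ++ ws) ?_]
      rw [pvDWappendAll _ cs ws (pvAllOfDWnil _ cs hd)]
      exact pvDWallNil _ ws hws
    · set d := cs.dropWhile PySem.Chars.isspace with hdd
      have hdapp : (cs ++ ws).dropWhile PySem.Chars.isspace = d ++ ws := pvDWappend _ cs ws hd
      by_cases h2 : d.dropWhile (fun c => !PySem.Chars.isspace c) = []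
      · -- the last word runs to the end of cs
        have hdall : ∀ c ∈ d, (fun c => !PySem.Chars.isspace c) c = true := pvAllOfDWnil _ d h2
        have htw : d.takeWhile (fun c => !PySem.Chars.isspace c) = d := by
          conv_rhs => rw [← List.takeWhile_append_dropWhile
            (p := fun c => !PySem.Chars.isspace c) (l := d), h2, List.append_nil]
        rw [pvSplitCons (cs ++ ws) (by rw [hdapp]; simp [hd]), hdapp]
        rw [pvTWappendAll _ d ws hdall, pvDWappendAll _ d ws hdall]
        have hwstw : ws.takeWhile (fun c => !PySem.Chars.isspace c) = [] := by
          cases hw : ws with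
          | nil => rfl
          | cons a t =>
            rw [List.takeWhile_cons_of_neg (by simp [hws a (hw ▸ List.mem_cons_self ..)])]
        have hwsdw : ws.dropWhile (fun c => !PySem.Chars.isspace c) = ws := by
          cases hw : ws with
          | nil => rfl
          | cons a t =>
            rw [List.dropWhile_cons_of_neg (by simp [hws a (hw ▸ List.mem_cons_self ..)])]
        rw [hwstw, List.append_nil, hwsdw, pvSplitNil ws (pvDWallNil _ ws hws)]
        rw [pvSplitCons cs hd, htw, h2, pvSplitNil [] rfl]
      · rw [pvSplitCons (cs ++ ws) (by rw [hdapp]; simp [hd]), hdapp]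
        rw [pvTWappend _ d ws h2, pvDWappend _ d ws h2]
        rw [pvSplitCons cs hd]
        have hlt : (d.dropWhile (fun c => !PySem.Chars.isspace c)).length < n := by
          have h3 : d.length ≤ cs.length := (List.dropWhile_sublist _).length_le
          cases hdc : d with
          | nil => exact absurd hdc hd
          | cons a t =>
            have ha : PySem.Chars.isspace a = false := pvDWhead _ cs a t (hdd ▸ hdc)
            rw [List.dropWhile_cons_of_pos (by simp [ha])]
            have h4 := (List.dropWhile_sublist (l := t) (fun c => !PySem.Chars.isspace c)).length_le
            have h5 : (a :: t).length ≤ cs.length := hdc ▸ h3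
            simp at h5
            omega
        rw [ih _ hlt _ le_rfl ws hws]

theorem pvSplitLstrip (l : List Char) :
    PySem.Chars.split₀ (l.dropWhile PySem.Chars.isspace) = PySem.Chars.split₀ l := by
  by_cases h : l.dropWhile PySem.Chars.isspace = []
  · rw [h, pvSplitNil l h]; rfl
  · rw [pvSplitCons _ (by rwa [List.dropWhile_idempotent]), List.dropWhile_idempotent,
      pvSplitCons l h]

theorem pvSplitStrip (l : List Char) :
    PySem.Chars.split₀ (PySem.Chars.strip l) = PySem.Chars.split₀ l := by
  have key : ∀ (m : List Char), PySem.Chars.split₀ (PySem.Chars.rstrip m) = PySem.Chars.split₀ m := by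
    intro m
    have hdec : m = PySem.Chars.rstrip m ++ (m.reverse.takeWhile PySem.Chars.isspace).reverse := by
      unfold PySem.Chars.rstrip
      conv_lhs => rw [← List.reverse_reverse m,
        ← List.takeWhile_append_dropWhile (p := PySem.Chars.isspace) (l := m.reverse)]
      rw [List.reverse_append]
    have hsp : ∀ c ∈ (m.reverse.takeWhile PySem.Chars.isspace).reverse, PySem.Chars.isspace c = true := by
      intro c hc
      rw [List.mem_reverse] at hc
      exact List.mem_takeWhile_imp hc
    conv_rhs => rw [hdec]
    exact (pvSplitAppendSpace (PySem.Chars.rstrip m).length (PySem.Chars.rstrip m) le_rfl _ hsp).symm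
  show PySem.Chars.split₀ (PySem.Chars.rstrip (PySem.Chars.lstrip l)) = _
  rw [key (PySem.Chars.lstrip l)]
  exact pvSplitLstrip l

-- ---- splitOn on '/' ----
def pvSlashParts (cs : List Char) : List (List Char) :=
  cs.takeWhile (fun c => !(c == '/')) ::
    (if _h : (cs.dropWhile (fun c => !(c == '/'))).isEmpty then []
     else pvSlashParts (cs.dropWhile (fun c => !(c == '/'))).tail)
termination_by cs.length
decreasing_by
  have h1 : (cs.dropWhile (fun c => !(c == '/'))).length ≤ cs.length :=
    (List.dropWhile_sublist _).length_le
  have h2 : (cs.dropWhile (fun c => !(c == '/'))).length ≠ 0 := by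
    simpa [List.isEmpty_iff_length_eq_zero] using _h
  simp [List.length_tail]; omega

def pvPrep (x : List Char) : List (List Char) → List (List Char)
  | [] => [x]
  | h :: t => (x ++ h) :: t

theorem pvGOnil (sep cur : List Char) (acc : List (List Char)) (f : Nat) :
    PySem.Chars.splitOn.go sep (f + 1) [] cur acc = (cur.reverse :: acc).reverse := by
  rw [PySem.Chars.splitOn.go]
  omega

theorem pvGOstep (sep : List Char) (c : Char) (rest cur : List Char) (acc : List (List Char)) (f : Nat) :
    PySem.Chars.splitOn.go sep (f + 1) (c :: rest) cur acc =
      (if sep.isPrefixOf (c :: rest) then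
        PySem.Chars.splitOn.go sep f (List.drop sep.length (c :: rest)) [] (cur.reverse :: acc)
       else PySem.Chars.splitOn.go sep f rest (c :: cur) acc) := by
  rw [PySem.Chars.splitOn.go]

theorem pvSlashParts_ne_nil (cs : List Char) : pvSlashParts cs ≠ [] := by
  rw [pvSlashParts]; simp

theorem pvGOslash : ∀ (fuel : Nat) (l cur : List Char) (acc : List (List Char)),
    l.length < fuel →
    PySem.Chars.splitOn.go ['/'] fuel l cur acc =
      acc.reverse ++ pvPrep cur.reverse (pvSlashParts l) := by
  intro fuel
  induction fuel with
  | zero => intro l cur acc h; omega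
  | succ f ih =>
    intro l cur acc h
    cases l with
    | nil =>
      rw [pvGOnil, pvSlashParts]
      simp [pvPrep]
    | cons c rest =>
      rw [pvGOstep]
      by_cases hc : c = '/'
      · subst hc
        rw [if_pos (by simp [List.isPrefixOf])]
        simp only [List.length_cons, List.length_nil, Nat.zero_add, List.drop_one, List.tail_cons]
        rw [ih rest [] (cur.reverse :: acc) (by simp at h; omega)]
        obtain ⟨hh, ht, hht⟩ : ∃ hh ht, pvSlashParts rest = hh :: ht := by
          cases hx : pvSlashParts rest with
          | nil => exact absurd hx (pvSlashParts_ne_nil rest)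
          | cons a b => exact ⟨a, b, rfl⟩
        conv_rhs => rw [pvSlashParts]
        rw [List.takeWhile_cons_of_neg (by simp), List.dropWhile_cons_of_neg (by simp)]
        rw [dif_neg (by simp), List.tail_cons, hht]
        simp [pvPrep]
      · rw [if_neg (by simp [List.isPrefixOf]; exact fun h2 => hc h2.symm)]
        rw [ih rest (c :: cur) acc (by simp at h; omega)]
        conv_rhs => rw [pvSlashParts]
        rw [List.takeWhile_cons_of_pos (by simp [hc]), List.dropWhile_cons_of_pos (by simp [hc])]
        conv_lhs => rw [pvSlashParts]
        rcases hx : (if h : (rest.dropWhile fun c => !(c == '/')).isEmpty = true then []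
            else pvSlashParts (rest.dropWhile fun c => !(c == '/')).tail) with _ | _
        all_goals simp [pvPrep]

theorem pvSplitOnSlash (cs : List Char) : PySem.Chars.splitOn cs ['/'] = pvSlashParts cs := by
  show PySem.Chars.splitOn.go ['/'] (cs.length + 1) cs [] [] = _
  rw [pvGOslash (cs.length + 1) cs [] [] (Nat.lt_succ_self _)]
  obtain ⟨h, t, hht⟩ : ∃ h t, pvSlashParts cs = h :: t := by
    cases hcs : pvSlashParts cs with
    | nil => exact absurd hcs (pvSlashParts_ne_nil cs)
    | cons h t => exact ⟨h, t, rfl⟩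
  rw [hht]; simp [pvPrep]

-- ---- B's tokenizer and slash-cutter against the library functions ----
theorem pvTokens_eq : ∀ (n : Nat) (l : List Char), l.length ≤ n →
    (∀ c ∈ l, PySem.Chars.isspace c = pvIsBlank c) →
    pvTokens n l = PySem.Chars.split₀ l := by
  intro n
  induction n with
  | zero =>
    intro l hlen _
    have : l = [] := List.length_eq_zero_iff.mp (Nat.le_zero.mp hlen)
    subst this
    rw [pvSplitNil [] rfl]; rfl
  | succ n ih =>
    intro l hlen hsp
    have e1 : l.dropWhile PySem.Chars.isspace = l.dropWhile pvIsBlank := pvDWcongr _ _ l hsp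
    simp only [pvTokens]
    cases h1 : l.dropWhile pvIsBlank with
    | nil => rw [pvSplitNil l (by rw [e1, h1])]
    | cons c t =>
      have e2 : (c :: t).dropWhile (fun x => !PySem.Chars.isspace x) =
          (c :: t).dropWhile (fun x => !pvIsBlank x) :=
        pvDWcongr _ _ _ (fun x hx => by
          rw [hsp x ((List.dropWhile_sublist _).mem (h1 ▸ hx))])
      have e3 : (c :: t).takeWhile (fun x => !PySem.Chars.isspace x) =
          (c :: t).takeWhile (fun x => !pvIsBlank x) :=
        pvTWcongr _ _ _ (fun x hx => by
          rw [hsp x ((List.dropWhile_sublist _).mem (h1 ▸ hx))])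
      rw [pvSplitCons l (by rw [e1, h1]; simp)]
      rw [e1, h1, e3, e2]
      show (List.takeWhile (fun x => !pvIsBlank x) (c :: t) ::
        pvTokens n ((c :: t).dropWhile (fun x => !pvIsBlank x))) = _
      congr 1
      have hc : pvIsBlank c = false := pvDWhead _ l c t h1
      apply ih
      · rw [List.dropWhile_cons_of_pos (by simp [hc])]
        have h2 : (l.dropWhile pvIsBlank).length ≤ l.length := (List.dropWhile_sublist _).length_le
        have h3 := (List.dropWhile_sublist (l := t) (fun x => !pvIsBlank x)).length_le
        rw [h1] at h2
        simp at h2 hlen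
        omega
      · intro x hx
        exact hsp x ((List.dropWhile_sublist _).mem (h1 ▸ ((List.dropWhile_sublist _).mem hx)))

theorem pvSlash_eq : ∀ (fuel : Nat) (cs : List Char), cs.length < fuel →
    pvSlash fuel cs = pvSlashParts cs := by
  intro fuel
  induction fuel with
  | zero => intro cs h; omega
  | succ f ih =>
    intro cs h
    rw [pvSlashParts]
    simp only [pvSlash]
    congr 1
    cases h1 : cs.dropWhile (fun c => !(c == '/')) with
    | nil => simp
    | cons c r =>
      rw [dif_neg (by simp)]
      show pvSlash f r = pvSlashParts (c :: r).tail
      rw [List.tail_cons]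
      apply ih
      have h2 : (c :: r).length ≤ cs.length := h1 ▸ (List.dropWhile_sublist _).length_le
      simp at h2
      omega

-- ---- per-line equivalence ----
theorem pvLineStep (l : List Char)
    (hdom : ∀ c ∈ l, pvDomChar c = true) (hbr : ∀ c ∈ l, pvIsBreak c = false)
    (acc : PySem.Set String × PySem.Set String) :
    pvBLine acc l = pvAStep acc (String.ofList l) := by
  have hspblank : ∀ c ∈ l, PySem.Chars.isspace c = pvIsBlank c :=
    fun c hc => pvBlankEq c (hdom c hc) (hbr c hc)
  have hA : PySem.Str.split₀ (PySem.Str.strip (String.ofList l)) =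
      (PySem.Chars.split₀ l).map String.ofList := by
    show List.map String.ofList (PySem.Chars.split₀
      (String.ofList (PySem.Chars.strip (String.ofList l).toList)).toList) = _
    rw [String.toList_ofList, String.toList_ofList, pvSplitStrip]
  unfold pvBLine pvAStep
  rw [pvTokens_eq l.length l le_rfl hspblank, hA, List.getElem?_map]
  cases hidx : (PySem.Chars.split₀ l)[1]? with
  | none => rfl
  | some tok =>
    simp only [Option.map_some]
    have hparts : pvParts (String.ofList tok) = (pvSlashParts tok).map String.ofList := by
      unfold pvParts PySem.Str.split?
      rw [String.toList_ofList]
      rw [show "/".toList = ['/'] from by decide]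
      simp [PySem.Chars.split?, pvSplitOnSlash]
    rw [pvSlash_eq (tok.length + 1) tok (Nat.lt_succ_self _), hparts]
    obtain ⟨w, rest, hw⟩ : ∃ w rest, pvSlashParts tok = w :: rest := by
      cases hx : pvSlashParts tok with
      | nil => exact absurd hx (pvSlashParts_ne_nil tok)
      | cons a b => exact ⟨a, b, rfl⟩
    rw [hw]
    by_cases hcond : w = "github.com".toList
    · rw [if_pos (by simpa using hcond), if_pos (by simp [hcond])]
      show (match (w :: rest)[1]? with
        | none => (PySem.Set.add acc.1 (String.ofList tok), acc.2)
        | some u => (PySem.Set.add acc.1 (String.ofList tok), PySem.Set.add acc.2 (String.ofList u))) = _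
      have hB1 : (w :: rest)[1]? = rest[0]? := rfl
      have hA1 : (List.map String.ofList (w :: rest))[1]? = Option.map String.ofList rest[0]? := by
        rw [List.getElem?_map]; rfl
      rw [hB1, hA1]
      cases hr0 : rest[0]? with
      | none => rfl
      | some u => rfl
    · rw [if_neg (by simpa using hcond), if_neg (by
        intro hc
        simp only [List.map_cons, List.headD_cons] at hc
        apply hcond
        have := congrArg String.toList hc
        rwa [String.toList_ofList] at this)]

-- ---- the main loop ----
theorem pvLoop : ∀ (n : Nat) (cs : List Char), cs.length ≤ n →
    (∀ c ∈ cs, pvDomChar c = true) →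
    ∀ acc, pvBLoop n cs acc =
      (PySem.Chars.splitlines cs).foldl (fun a l => pvAStep a (String.ofList l)) acc := by
  intro n
  induction n with
  | zero =>
    intro cs hlen _ acc
    have : cs = [] := List.length_eq_zero_iff.mp (Nat.le_zero.mp hlen)
    subst this
    rw [pvSplitlinesNil]; rfl
  | succ n ih =>
    intro cs hlen hdom acc
    cases cs with
    | nil => rw [pvSplitlinesNil]; rfl
    | cons c tl =>
      rw [pvSplitlinesCons (c :: tl) (by simp) hdom]
      simp only [List.foldl_cons, pvBLoop]
      rw [pvLineStep ((c :: tl).takeWhile (fun x => !pvIsBreak x))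
        (fun x hx => hdom x ((List.takeWhile_sublist _).mem hx))
        (fun x hx => by simpa using List.mem_takeWhile_imp hx) acc]
      apply ih
      · have h1 := pvSkipBreak_len c ((c :: tl).dropWhile (fun x => !pvIsBreak x)).tail
        have h2 : ((c :: tl).dropWhile (fun x => !pvIsBreak x)).length ≤ (c :: tl).length :=
          (List.dropWhile_sublist _).length_le
        cases hd : (c :: tl).dropWhile (fun x => !pvIsBreak x) with
        | nil => simp [pvSkipBreak_nil]
        | cons d dt =>
          have := pvSkipBreak_len d dt
          rw [hd] at h2
          simp at h2 hlen ⊢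
          omega
      · intro x hx
        exact hdom x ((List.dropWhile_sublist _).mem (pvSkipBreak_subset _ x hx))

-- ===== VERDICT (by name: the statement is the Claim_ definition above) =====
theorem parse_go_mod_graph_command_output_py_spec : Claim_equal_parse_go_mod_graph_command_output_py := by
  intro g hdom _hpre
  unfold Spec_parse_go_mod_graph_command_output_py
  unfold parse_go_mod_graph_command_output_py parse_go_mod_graph_command_output_py_alt
  have hdom' : ∀ c ∈ g.toList, pvDomChar c = true := by
    intro c hc
    unfold Dom_parse_go_mod_graph_command_output_py pvDomStr at hdom
    exact List.all_eq_true.mp hdom c hc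
  rw [pvLoop g.toList.length g.toList le_rfl hdom']
  show List.foldl pvAStep _ (List.map String.ofList (PySem.Chars.splitlines g.toList)) = _
  rw [List.foldl_map]
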